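-- pv_equiv track=rewrite | github.com/LuminosoInsight/exquisite-corpus | exquisite_corpus/sparse_assoc.py | intersperse_lists
-- ===== SOURCE A (Python) =====
-- def intersperse_lists(list1, list2):
--     if not list1:
--         return list2
--     if not list2:
--         return list1
--     pos1 = 1
--     pos2 = 1
--     len1 = len(list1)
--     len2 = len(list2)
--     results = [list1[0], list2[0]]
--
--     while pos1 < len1 or pos2 < len2:
--         #if (pos1 / len1) <= (pos2 / len2)
--         if pos1 < len1 and (pos1 * len2 <= pos2 * len1):
--             results.append(list1[pos1])
--             pos1 += 1
--         else:
--             if pos2 >= len2: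
--                 raise ValueError(((pos1, len1), (pos2, len2)))
--             results.append(list2[pos2])
--             pos2 += 1
--     return results
-- ===== SOURCE B (Python) =====
-- def intersperse_lists(list1, list2):
--     if not list1:
--         return list2
--     if not list2:
--         return list1
--     len1 = len(list1)
--     len2 = len(list2)
--     # key encodes the proportional position i/len as a tie-broken integer:
--     # 2*i*len2 for list1 entries, 2*j*len1 + 1 for list2 entries, so that
--     # equal proportional positions put the list1 entry first.
--     tagged = [(2 * i * len2, x) for i, x in enumerate(list1)]
--     tagged += [(2 * j * len1 + 1, y) for j, y in enumerate(list2)]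
--     tagged.sort(key=lambda t: t[0])
--     return [x for _, x in tagged]
-- ===== Notes on version B (the rewrite author's own statement) =====
-- stated objective: alternative
-- what changed: Replaces the two-pointer proportional merge loop with a build-tagged-index-then-stable-sort strategy: each element gets an integer key 2*i*len_other (+1 for list2) encoding its proportional position with list1 winning ties, and the answer is the sorted tagged list projected to elements.
import Mathlib
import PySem

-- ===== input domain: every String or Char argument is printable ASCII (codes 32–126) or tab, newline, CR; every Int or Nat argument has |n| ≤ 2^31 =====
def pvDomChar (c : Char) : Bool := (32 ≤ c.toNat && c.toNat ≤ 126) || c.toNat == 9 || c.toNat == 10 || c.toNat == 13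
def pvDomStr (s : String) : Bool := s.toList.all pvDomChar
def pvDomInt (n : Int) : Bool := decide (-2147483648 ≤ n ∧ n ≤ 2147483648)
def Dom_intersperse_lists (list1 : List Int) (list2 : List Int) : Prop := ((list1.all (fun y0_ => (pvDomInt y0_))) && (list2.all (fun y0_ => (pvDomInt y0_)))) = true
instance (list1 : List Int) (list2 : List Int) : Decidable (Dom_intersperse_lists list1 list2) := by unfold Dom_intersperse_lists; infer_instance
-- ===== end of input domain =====

-- B replaces A's two-pointer proportional merge by a build-tagged-keys-then-sort
-- strategy (same values; equally costly — no speed claim).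

-- ===== PORT A =====
-- the while loop of A; `results` is the accumulator
def interLoop (list1 list2 : List Int) (len1 len2 : Nat) (pos1 pos2 : Nat)
    (results : List Int) : List Int :=
  if pos1 < len1 ∨ pos2 < len2 then
    if pos1 < len1 ∧ pos1 * len2 ≤ pos2 * len1 then
      interLoop list1 list2 len1 len2 (pos1 + 1) pos2
        (results ++ [PySem.List.pyGetD list1 (pos1 : Int) 0])
    else
      if len2 ≤ pos2 then
        results   -- Python raises ValueError here; the equivalence proof shows this branch is unreachable
      else
        interLoop list1 list2 len1 len2 pos1 (pos2 + 1)
          (results ++ [PySem.List.pyGetD list2 (pos2 : Int) 0])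
  else results
termination_by (len1 - pos1) + (len2 - pos2)
decreasing_by all_goals omega

def intersperse_lists (list1 : List Int) (list2 : List Int) : List Int :=
  if list1 = [] then list2
  else if list2 = [] then list1
  else
    interLoop list1 list2 list1.length list2.length 1 1
      [PySem.List.pyGetD list1 (0 : Int) 0, PySem.List.pyGetD list2 (0 : Int) 0]

-- ===== PORT B =====
def intersperse_lists_alt (list1 : List Int) (list2 : List Int) : List Int :=
  if list1 = [] then list2
  else if list2 = [] then list1
  else
    let len1 : Int := list1.length
    let len2 : Int := list2.length
    let tagged : List (Int × Int) :=
      (PySem.List.enumerate list1 0).map (fun p => (2 * p.1 * len2, p.2))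
      ++ (PySem.List.enumerate list2 0).map (fun p => (2 * p.1 * len1 + 1, p.2))
    (PySem.List.sorted tagged (fun t => t.1) false).map (fun t => t.2)

-- ===== PRECONDITION & SPEC =====
def Spec_intersperse_lists (list1 : List Int) (list2 : List Int) (out : List Int) : Prop := out = intersperse_lists_alt list1 list2
instance (list1 : List Int) (list2 : List Int) (out : List Int) : Decidable (Spec_intersperse_lists list1 list2 out) := by unfold Spec_intersperse_lists; infer_instance

-- ===== CLAIM (what is proved, stated in full; the proofs are below) =====
def Claim_equal_intersperse_lists : Prop := ∀ (list1 : List Int) (list2 : List Int), Dom_intersperse_lists list1 list2 → Spec_intersperse_lists list1 list2 (intersperse_lists list1 list2)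

-- ===== LEMMAS AND PROOFS =====

-- the tagged sequence in A's emission order, starting at positions (p1, p2)
def mergeT (list1 list2 : List Int) (p1 p2 : Nat) : List (Int × Int) :=
  if p1 < list1.length ∨ p2 < list2.length then
    if p1 < list1.length ∧ p1 * list2.length ≤ p2 * list1.length then
      ((2 * p1 * list2.length : Nat), list1.getD p1 0) :: mergeT list1 list2 (p1 + 1) p2
    else
      if list2.length ≤ p2 then []
      else ((2 * p2 * list1.length + 1 : Nat), list2.getD p2 0) :: mergeT list1 list2 p1 (p2 + 1)
  else []
termination_by (list1.length - p1) + (list2.length - p2)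
decreasing_by all_goals omega

theorem interLoop_eq_mergeT (list1 list2 : List Int) (p1 p2 : Nat) (res : List Int) :
    interLoop list1 list2 list1.length list2.length p1 p2 res
      = res ++ (mergeT list1 list2 p1 p2).map (fun t => t.2) := by
  induction p1, p2, res using
      (fun motive h1 h2 h3 => interLoop.induct list1 list2 list1.length list2.length motive h1 h2 h3) with
  | case1 p1 p2 res hor hc ih =>
      rw [interLoop, mergeT]
      simp only [hc, ih]
      simp [PySem.List.pyGetD_natCast]
  | case2 p1 p2 res hor hc hge =>
      rw [interLoop, mergeT]
      simp [hor, hc, hge]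
  | case3 p1 p2 res hor hc hge ih =>
      rw [interLoop, mergeT]
      have hlt : ¬ list2.length ≤ p2 := hge
      simp only [hor, hc, hlt, if_pos, if_false, ih]
      simp [PySem.List.pyGetD_natCast]
  | case4 p1 p2 res hor =>
      rw [interLoop, mergeT]
      simp [hor]

-- the tagged full lists of B, abbreviated
def tagA (list1 list2 : List Int) : List (Int × Int) :=
  (PySem.List.enumerate list1 0).map (fun p => (2 * p.1 * (list2.length : Int), p.2))

def tagB (list1 list2 : List Int) : List (Int × Int) :=
  (PySem.List.enumerate list2 0).map (fun p => (2 * p.1 * (list1.length : Int) + 1, p.2))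

theorem tagA_drop_cons (list1 list2 : List Int) (p : Nat) (hp : p < list1.length) :
    (tagA list1 list2).drop p
      = (((2 * p * list2.length : Nat) : Int), list1.getD p 0) :: (tagA list1 list2).drop (p + 1) := by
  have hlen : p < (tagA list1 list2).length := by
    simp [tagA, PySem.List.length_enumerate, hp]
  rw [List.drop_eq_getElem_cons hlen]
  congr 1
  simp [tagA, PySem.List.getElem_enumerate, List.getD, List.getElem?_eq_getElem hp]

theorem tagB_drop_cons (list1 list2 : List Int) (p : Nat) (hp : p < list2.length) :
    (tagB list1 list2).drop p
      = (((2 * p * list1.length + 1 : Nat) : Int), list2.getD p 0) :: (tagB list1 list2).drop (p + 1) := by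
  have hlen : p < (tagB list1 list2).length := by
    simp [tagB, PySem.List.length_enumerate, hp]
  rw [List.drop_eq_getElem_cons hlen]
  congr 1
  simp [tagB, PySem.List.getElem_enumerate, List.getD, List.getElem?_eq_getElem hp]

theorem mergeT_perm (list1 list2 : List Int) (p1 p2 : Nat)
    (h1 : p1 ≤ list1.length) (h2 : p2 ≤ list2.length) :
    (mergeT list1 list2 p1 p2).Perm
      ((tagA list1 list2).drop p1 ++ (tagB list1 list2).drop p2) := by
  induction p1, p2 using (fun motive h1 h2 h3 => mergeT.induct list1 list2 motive h1 h2 h3) with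
  | case1 p1 p2 hor hc ih =>
      rw [mergeT]
      simp only [hc]
      rw [tagA_drop_cons list1 list2 p1 hc.1]
      exact (ih (by omega) h2).cons _
  | case2 p1 p2 hor hc hge =>
      exfalso
      rcases hor with hlt1 | hlt2
      · rcases Nat.lt_or_ge p1 list1.length with hp1 | hp1
        · rcases Nat.lt_or_ge (p1 * list2.length) (p2 * list1.length + 1) with hm | hm
          · exact hc ⟨hp1, by omega⟩
          · have : p2 * list1.length < p1 * list2.length := by omega
            have hb : p1 * list2.length ≤ list1.length * list2.length :=
              Nat.mul_le_mul_right _ (Nat.le_of_lt hp1)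
            have hb2 : list2.length * list1.length ≤ p2 * list1.length :=
              Nat.mul_le_mul_right _ hge
            nlinarith
        · omega
      · omega
  | case3 p1 p2 hor hc hge ih =>
      rw [mergeT]
      have hlt2 : p2 < list2.length := by omega
      simp only [hor, hc, hge, if_pos, if_false]
      rw [tagB_drop_cons list1 list2 p2 hlt2]
      exact ((ih h1 (by omega)).cons _).trans List.perm_middle.symm
  | case4 p1 p2 hor =>
      rw [mergeT]
      have e1 : p1 = list1.length := by omega
      have e2 : p2 = list2.length := by omega
      simp [e1, e2, tagA, tagB, List.drop_eq_nil_of_le, PySem.List.length_enumerate]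

theorem mergeT_pairwise_lb (list1 list2 : List Int) (p1 p2 : Nat)
    (h1 : p1 ≤ list1.length) (h2 : p2 ≤ list2.length)
    (hn1 : 0 < list1.length) (hn2 : 0 < list2.length) :
    (mergeT list1 list2 p1 p2).Pairwise (fun a b => a.1 < b.1)
      ∧ ∀ e ∈ mergeT list1 list2 p1 p2,
          ((min (2 * p1 * list2.length) (2 * p2 * list1.length + 1) : Nat) : Int) ≤ e.1 := by
  induction p1, p2 using (fun motive h1 h2 h3 => mergeT.induct list1 list2 motive h1 h2 h3) with
  | case1 p1 p2 hor hc ih =>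
      rw [mergeT]
      simp only [hc]
      obtain ⟨ihp, ihlb⟩ := ih (by omega) h2
      have hkey : ∀ e ∈ mergeT list1 list2 (p1 + 1) p2,
          ((2 * p1 * list2.length : Nat) : Int) < e.1 := by
        intro e he
        have := ihlb e he
        have hb : 2 * p1 * list2.length < min (2 * (p1 + 1) * list2.length) (2 * p2 * list1.length + 1) := by
          have hle : p1 * list2.length ≤ p2 * list1.length := hc.2
          have hx1 : 2 * p1 * list2.length < 2 * (p1 + 1) * list2.length := by nlinarith
          have hx2 : 2 * p1 * list2.length < 2 * p2 * list1.length + 1 := by nlinarith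
          exact lt_min hx1 hx2
        have hb' : ((2 * p1 * list2.length : Nat) : Int)
            < ((min (2 * (p1 + 1) * list2.length) (2 * p2 * list1.length + 1) : Nat) : Int) := by
          exact_mod_cast hb
        exact lt_of_lt_of_le hb' this
      refine ⟨List.Pairwise.cons hkey ihp, ?_⟩
      intro e he
      rcases List.mem_cons.mp he with rfl | he'
      · show ((min (2 * p1 * list2.length) (2 * p2 * list1.length + 1) : Nat) : Int)
            ≤ ((2 * p1 * list2.length : Nat) : Int)
        exact_mod_cast Nat.min_le_left _ _
      · have := hkey e he'
        have hmin' : ((min (2 * p1 * list2.length) (2 * p2 * list1.length + 1) : Nat) : Int)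
            ≤ ((2 * p1 * list2.length : Nat) : Int) := by
          exact_mod_cast Nat.min_le_left _ _
        exact le_of_lt (lt_of_le_of_lt hmin' this)
  | case2 p1 p2 hor hc hge =>
      exfalso
      rcases hor with hlt1 | hlt2
      · rcases Nat.lt_or_ge p1 list1.length with hp1 | hp1
        · rcases Nat.lt_or_ge (p1 * list2.length) (p2 * list1.length + 1) with hm | hm
          · exact hc ⟨hp1, by omega⟩
          · have hb : p1 * list2.length ≤ list1.length * list2.length :=
              Nat.mul_le_mul_right _ (Nat.le_of_lt hp1)
            have hb2 : list2.length * list1.length ≤ p2 * list1.length :=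
              Nat.mul_le_mul_right _ hge
            nlinarith
        · omega
      · omega
  | case3 p1 p2 hor hc hge ih =>
      rw [mergeT]
      simp only [hor, hc, hge, if_pos, if_false]
      obtain ⟨ihp, ihlb⟩ := ih h1 (by omega)
      have hkey : ∀ e ∈ mergeT list1 list2 p1 (p2 + 1),
          ((2 * p2 * list1.length + 1 : Nat) : Int) < e.1 := by
        intro e he
        have := ihlb e he
        have hb : 2 * p2 * list1.length + 1 < min (2 * p1 * list2.length) (2 * (p2 + 1) * list1.length + 1) := by
          have hgt : p2 * list1.length < p1 * list2.length := by
            rcases Nat.lt_or_ge p1 list1.length with hp1 | hp1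
            · rcases Nat.lt_or_ge (p2 * list1.length) (p1 * list2.length) with hm | hm
              · exact hm
              · exact absurd ⟨hp1, hm⟩ hc
            · have e1 : p1 = list1.length := by omega
              subst e1
              have hlt2 : p2 < list2.length := by omega
              have : p2 * list1.length < list2.length * list1.length := by nlinarith
              nlinarith
          have h1' : 2 * p2 * list1.length + 1 < 2 * p1 * list2.length := by nlinarith
          have h2' : 2 * p2 * list1.length + 1 < 2 * (p2 + 1) * list1.length + 1 := by nlinarith
          omega
        have hb' : ((2 * p2 * list1.length + 1 : Nat) : Int)
            < ((min (2 * p1 * list2.length) (2 * (p2 + 1) * list1.length + 1) : Nat) : Int) := by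
          exact_mod_cast hb
        exact lt_of_lt_of_le hb' this
      refine ⟨List.Pairwise.cons hkey ihp, ?_⟩
      intro e he
      rcases List.mem_cons.mp he with rfl | he'
      · show ((min (2 * p1 * list2.length) (2 * p2 * list1.length + 1) : Nat) : Int)
            ≤ ((2 * p2 * list1.length + 1 : Nat) : Int)
        exact_mod_cast Nat.min_le_right _ _
      · have := hkey e he'
        have hmin' : ((min (2 * p1 * list2.length) (2 * p2 * list1.length + 1) : Nat) : Int)
            ≤ ((2 * p2 * list1.length + 1 : Nat) : Int) := by
          exact_mod_cast Nat.min_le_right _ _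
        exact le_of_lt (lt_of_le_of_lt hmin' this)
  | case4 p1 p2 hor =>
      rw [mergeT]
      simp [hor]

-- the full tagged list in emission order is sorted(tagged)
theorem sorted_tagged_eq (list1 list2 : List Int)
    (hn1 : list1 ≠ []) (hn2 : list2 ≠ []) :
    PySem.List.sorted (tagA list1 list2 ++ tagB list1 list2) (fun t => t.1) false
      = ((0 : Int), list1.getD 0 0) :: ((1 : Int), list2.getD 0 0) :: mergeT list1 list2 1 1 := by
  have hl1 : 0 < list1.length := List.length_pos_iff.mpr hn1
  have hl2 : 0 < list2.length := List.length_pos_iff.mpr hn2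
  apply PySem.List.sorted_eq_of_perm_of_pairwise_lt
  · -- permutation
    have hA : tagA list1 list2
        = ((0 : Int), list1.getD 0 0) :: (tagA list1 list2).drop 1 := by
      have := tagA_drop_cons list1 list2 0 hl1
      simpa using this
    have hB : tagB list1 list2
        = ((1 : Int), list2.getD 0 0) :: (tagB list1 list2).drop 1 := by
      have := tagB_drop_cons list1 list2 0 hl2
      simpa using this
    have hperm := mergeT_perm list1 list2 1 1 hl1 hl2
    rw [hA, hB]
    exact (((hperm.cons _).trans List.perm_middle.symm).cons _)
  · -- strictly increasing keys
    have hlb := (mergeT_pairwise_lb list1 list2 1 1 hl1 hl2 hl1 hl2).2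
    have hpw := (mergeT_pairwise_lb list1 list2 1 1 hl1 hl2 hl1 hl2).1
    have hgt : ∀ e ∈ mergeT list1 list2 1 1, (1 : Int) < e.1 := by
      intro e he
      have := hlb e he
      have hb : 2 ≤ min (2 * 1 * list2.length) (2 * 1 * list1.length + 1) := by omega
      have hb' : (2 : Int) ≤ ((min (2 * 1 * list2.length) (2 * 1 * list1.length + 1) : Nat) : Int) := by
        exact_mod_cast hb
      omega
    refine List.Pairwise.cons ?_ (List.Pairwise.cons hgt hpw)
    intro e he
    rcases List.mem_cons.mp he with rfl | he'
    · simp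
    · have := hgt e he'
      simp only at this ⊢
      omega

-- ===== VERDICT (by name: the statement is the Claim_ definition above) =====
theorem intersperse_lists_spec : Claim_equal_intersperse_lists := by
  intro list1 list2 _
  unfold Spec_intersperse_lists intersperse_lists intersperse_lists_alt
  by_cases h1 : list1 = []
  · simp [h1]
  · by_cases h2 : list2 = []
    · simp [h1, h2]
    · simp only [h1, h2, if_false]
      rw [interLoop_eq_mergeT]
      have htag : ((PySem.List.enumerate list1 0).map (fun p => (2 * p.1 * (list2.length : Int), p.2))
          ++ (PySem.List.enumerate list2 0).map (fun p => (2 * p.1 * (list1.length : Int) + 1, p.2)))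
          = tagA list1 list2 ++ tagB list1 list2 := rfl
      rw [htag, sorted_tagged_eq list1 list2 h1 h2]
      simp [PySem.List.pyGetD_zero]
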